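-- pv_equiv track=rewrite | github.com/GeonHyeongKim/2022-2-Algorithm-Study | src/chanhyun/week3/방금그곡.py | changeNote
-- ===== SOURCE A (Python) =====
-- def changeNote(note):
--     newNote = ''
--     for i in range(len(note)):
--         if note[i] == '#':
--             continue
--         if i < len(note)-1 and note[i+1] =='#':
--             newNote += note[i].lower()
--         else:
--             newNote += note[i]
--     return newNote
-- ===== SOURCE B (Python) =====
-- import re
--
-- def changeNote(note):
--     # one regex pass: each "<char>#" pair becomes the lowercased char; stray '#' dropped after
--     return re.sub(r'.#', lambda m: m.group()[0].lower(), note, flags=re.DOTALL).replace('#', '')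
-- ===== Notes on version B (the rewrite author's own statement) =====
-- stated objective: idiomatic
-- what changed: A's explicit index loop with note[i+1] lookahead is replaced by a single regex substitution replacing each '<char>#' pair with the lowercased leading char, followed by stripping remaining '#'.
import Mathlib
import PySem

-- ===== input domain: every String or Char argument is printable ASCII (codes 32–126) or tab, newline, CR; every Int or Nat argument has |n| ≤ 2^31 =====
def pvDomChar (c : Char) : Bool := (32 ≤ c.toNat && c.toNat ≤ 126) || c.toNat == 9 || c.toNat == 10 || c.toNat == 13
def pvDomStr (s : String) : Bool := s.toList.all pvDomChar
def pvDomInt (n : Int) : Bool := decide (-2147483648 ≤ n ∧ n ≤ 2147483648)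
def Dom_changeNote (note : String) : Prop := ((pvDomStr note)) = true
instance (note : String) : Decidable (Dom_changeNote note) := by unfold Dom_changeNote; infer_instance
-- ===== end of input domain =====

-- B replaces A's index loop with lookahead by a single pattern pass (regex '.#' substitution)
-- followed by dropping stray '#'; objective: idiomatic, same cost.

-- ===== PORT A =====
-- literal transliteration of A's index loop; the `none` branch of the lookup is unreachable
-- (i ranges over the valid indices) and returns the accumulator unchanged.
def changeNote (note : String) : String :=
  String.ofList <|
    (PySem.List.pyRange 0 (PySem.Str.len note) 1).foldl (fun newNote i =>
      match PySem.Str.pyGet? note i with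
      | none => newNote
      | some c =>
        if c = '#' then newNote
        else if i < PySem.Str.len note - 1 ∧ PySem.Str.pyGet? note (i + 1) = some '#' then
          newNote ++ [PySem.Chars.lowerChar c]
        else newNote ++ [c]) []

-- ===== PORT B =====
-- the regex pass of Source B: left-to-right non-overlapping '.#' → lowercased leading char
def subPass : List Char → List Char
  | [] => []
  | [c] => [c]
  | c1 :: c2 :: rest =>
    if c2 = '#' then PySem.Chars.lowerChar c1 :: subPass rest
    else c1 :: subPass (c2 :: rest)

-- Source B: re.sub pass, then .replace('#','') (= drop every remaining '#')
def changeNote_alt (note : String) : String :=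
  String.ofList ((subPass note.toList).filter (· ≠ '#'))

-- ===== PRECONDITION & SPEC =====
def Spec_changeNote (note : String) (out : String) : Prop := out = changeNote_alt note
instance (note : String) (out : String) : Decidable (Spec_changeNote note out) := by unfold Spec_changeNote; infer_instance

-- ===== CLAIM (what is proved, stated in full; the proofs are below) =====
def Claim_equal_changeNote : Prop := ∀ (note : String), Dom_changeNote note → Spec_changeNote note (changeNote note)

-- ===== LEMMAS AND PROOFS =====

-- common characterisation: lookahead recursion over the character list
def goA : List Char → List Char
  | [] => []
  | c :: rest =>
    (if c = '#' then [] else if rest.head? = some '#' then [PySem.Chars.lowerChar c] else [c])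
      ++ goA rest

lemma foldA_suffix (cs : List Char) :
    ∀ (a : Nat) (acc : List Char), a ≤ cs.length →
    (PySem.List.pyRange a cs.length 1).foldl (fun newNote i =>
      match PySem.List.pyGet? cs i with
      | none => newNote
      | some c =>
        if c = '#' then newNote
        else if i < (cs.length : Int) - 1 ∧ PySem.List.pyGet? cs (i + 1) = some '#' then
          newNote ++ [PySem.Chars.lowerChar c]
        else newNote ++ [c]) acc
      = acc ++ goA (cs.drop a) := by
  intro a
  induction h : cs.length - a generalizing a with
  | zero =>
    intro acc ha
    have hae : a = cs.length := by omega
    subst hae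
    rw [PySem.List.pyRange_one_eq_nil (by omega)]
    simp [goA]
  | succ k ih =>
    intro acc ha
    have hlt : a < cs.length := by omega
    rw [PySem.List.pyRange_one_cons (by exact_mod_cast hlt)]
    simp only [List.foldl_cons]
    have hget : PySem.List.pyGet? cs (a : Int) = some cs[a] :=
      PySem.List.pyGet?_ofNat cs a hlt
    have hdrop : cs.drop a = cs[a] :: cs.drop (a + 1) := List.drop_eq_getElem_cons hlt
    have hget1 : PySem.List.pyGet? cs ((a : Int) + 1) = cs[a + 1]? := by
      have : ((a : Int) + 1) = ((a + 1 : Nat) : Int) := by push_cast; ring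
      rw [this, PySem.List.pyGet?_natCast]
    have hhead : (cs.drop (a + 1)).head? = cs[a + 1]? := by
      rcases Nat.lt_or_ge (a + 1) cs.length with h1 | h1
      · rw [List.drop_eq_getElem_cons h1]
        simp [h1]
      · rw [List.drop_eq_nil_of_le h1]
        simp [List.getElem?_eq_none h1]
    have hcond : ((a : Int) < (cs.length : Int) - 1 ∧ PySem.List.pyGet? cs ((a : Int) + 1) = some '#')
        ↔ (cs.drop (a + 1)).head? = some '#' := by
      rw [hget1, hhead]
      constructor
      · exact fun h => h.2
      · intro h
        refine ⟨?_, h⟩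
        obtain ⟨hlen, -⟩ := List.getElem?_eq_some_iff.mp h
        omega
    have ihs := fun acc' => ih (a + 1) (by omega) acc' (by omega)
    have hstep : ((a : Int) + 1) = ((a + 1 : Nat) : Int) := by push_cast; ring
    simp only [hget]
    rw [hstep] at hcond ⊢
    by_cases hc : cs[a] = '#'
    · rw [if_pos hc, ihs acc, hdrop]
      simp [goA, hc]
    · rw [if_neg hc]
      by_cases h2 : (cs.drop (a + 1)).head? = some '#'
      · rw [if_pos (hcond.mpr h2), ihs (acc ++ [PySem.Chars.lowerChar cs[a]]), hdrop]
        simp [goA, hc, h2]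
      · rw [if_neg (fun hh => h2 (hcond.mp hh)), ihs (acc ++ [cs[a]]), hdrop]
        have h2' : ¬ cs[a + 1]? = some '#' := hhead ▸ h2
        simp [goA, hc, h2']

lemma changeNote_eq_goA (note : String) :
    changeNote note = String.ofList (goA note.toList) := by
  unfold changeNote
  simp only [PySem.Str.len, PySem.Str.pyGet?, PySem.Chars.pyGet?]
  have hmain := foldA_suffix note.toList 0 [] (Nat.zero_le _)
  simp only [Nat.cast_zero, List.drop_zero, List.nil_append] at hmain
  exact congrArg String.ofList hmain

lemma lowerChar_ne_hash {c : Char} (hc : c ≠ '#') : PySem.Chars.lowerChar c ≠ '#' := by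
  simp only [PySem.Chars.lowerChar, PySem.Chars.isupper, Bool.and_eq_true, decide_eq_true_eq]
  split_ifs with h
  · obtain ⟨h1, h2⟩ := h
    have hA : 65 ≤ c.toNat := by simpa using UInt32.le_iff_toNat_le.mp ((Char.le_def).mp h1)
    have hZ : c.toNat ≤ 90 := by simpa using UInt32.le_iff_toNat_le.mp ((Char.le_def).mp h2)
    intro hcontra
    have ht := congrArg Char.toNat hcontra
    rw [Char.toNat_ofNat, if_pos (Or.inl (by omega))] at ht
    have h35 : '#'.toNat = 35 := rfl
    omega
  · exact hc

lemma filter_subPass_eq_goA : ∀ cs : List Char,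
    (subPass cs).filter (· ≠ '#') = goA cs := by
  intro cs
  induction cs using subPass.induct with
  | case1 => simp [subPass, goA]
  | case2 c =>
    by_cases hc : c = '#' <;> simp [subPass, goA, hc]
  | case3 c1 rest ih =>
    by_cases hc1 : c1 = '#'
    · subst hc1
      simp [subPass, goA, PySem.Chars.lowerChar, PySem.Chars.isupper]
      simpa using ih
    · simp [subPass, goA, hc1, lowerChar_ne_hash hc1]
      simpa using ih
  | case4 c1 c2 rest h2 ih =>
    by_cases hc1 : c1 = '#'
    · subst hc1
      simp [subPass, goA, h2]
      simpa [goA, h2] using ih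
    · simp [subPass, goA, h2, hc1]
      simpa [goA, h2] using ih

-- ===== VERDICT (by name: the statement is the Claim_ definition above) =====
theorem changeNote_spec : Claim_equal_changeNote := by
  intro note _
  unfold Spec_changeNote changeNote_alt
  rw [changeNote_eq_goA, filter_subPass_eq_goA]
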